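-- pv_equiv track=rewrite | github.com/workbuddy248/Agent | testAgent/backend/services/template_manager.py | _apply_default_values
-- ===== SOURCE A (Python) =====
-- def _apply_default_values(content: str) -> str:
--     """Apply default values to any remaining placeholders"""
--
--     default_values = {
--         "cluster_ip": "192.168.1.100",
--         "cluster_url": "https://192.168.1.100",
--         "username": "admin",
--         "password": "admin123",
--         "fabric_name": "TestFabric",
--         "area_name": "TestArea",
--         "building_name": "TestBuilding",
--         "device_count": "1",
--         "l3vn_count": "1",
--         "timeout": "30000",
--         "file_name": "devices.csv",
--         "bgp_asn": "1200"
--     }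
--
--     for param, default_value in default_values.items():
--         placeholder = f"{{{{{param}}}}}"
--         content = content.replace(placeholder, default_value)
--
--     return content
-- ===== SOURCE B (Python) =====
-- def _apply_default_values(content: str) -> str:
--     """Apply default values to any remaining placeholders (single left-to-right pass)"""
--
--     placeholders = [
--         ("{{cluster_ip}}", "192.168.1.100"),
--         ("{{cluster_url}}", "https://192.168.1.100"),
--         ("{{username}}", "admin"),
--         ("{{password}}", "admin123"),
--         ("{{fabric_name}}", "TestFabric"),
--         ("{{area_name}}", "TestArea"),
--         ("{{building_name}}", "TestBuilding"),
--         ("{{device_count}}", "1"),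
--         ("{{l3vn_count}}", "1"),
--         ("{{timeout}}", "30000"),
--         ("{{file_name}}", "devices.csv"),
--         ("{{bgp_asn}}", "1200"),
--     ]
--
--     out = []
--     i = 0
--     n = len(content)
--     while i < n:
--         for token, value in placeholders:
--             if content.startswith(token, i):
--                 out.append(value)
--                 i += len(token)
--                 break
--         else:
--             out.append(content[i])
--             i += 1
--     return "".join(out)
-- ===== Notes on version B (the rewrite author's own statement) =====
-- stated objective: alternative
-- what changed: A rebuilds the whole string once per placeholder (12 sequential str.replace passes over a dict of keys); B hardcodes the brace-wrapped tokens and makes a single left-to-right pass over the input, emitting at each position either the mapped value or the current character.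
import Mathlib
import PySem

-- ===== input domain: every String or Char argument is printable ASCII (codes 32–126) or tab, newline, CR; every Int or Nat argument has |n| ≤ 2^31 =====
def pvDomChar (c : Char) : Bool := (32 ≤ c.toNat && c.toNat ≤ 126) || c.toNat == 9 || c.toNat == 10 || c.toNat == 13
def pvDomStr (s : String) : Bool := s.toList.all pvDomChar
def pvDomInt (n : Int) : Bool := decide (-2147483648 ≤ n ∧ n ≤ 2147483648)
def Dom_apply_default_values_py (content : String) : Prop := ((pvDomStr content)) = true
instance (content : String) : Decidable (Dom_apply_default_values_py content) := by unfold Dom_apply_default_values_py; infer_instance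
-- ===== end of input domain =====

-- B replaces A's 12 sequential full-string replace passes by ONE left-to-right pass over a
-- hardcoded table of brace-wrapped tokens (same order) — same return value, one traversal
-- of the input instead of one per placeholder.

-- ===== PORT A =====
-- the dict literal `default_values` (insertion order)
def pvDefaultValues : List (String × String) :=
  [("cluster_ip", "192.168.1.100"),
   ("cluster_url", "https://192.168.1.100"),
   ("username", "admin"),
   ("password", "admin123"),
   ("fabric_name", "TestFabric"),
   ("area_name", "TestArea"),
   ("building_name", "TestBuilding"),
   ("device_count", "1"),
   ("l3vn_count", "1"),
   ("timeout", "30000"),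
   ("file_name", "devices.csv"),
   ("bgp_asn", "1200")]

-- A: for param, default_value in default_values.items(): content = content.replace(f"{{{{{param}}}}}", default_value)
def apply_default_values_py (content : String) : String :=
  pvDefaultValues.foldl
    (fun acc p => PySem.Str.replace acc ("{{" ++ p.1 ++ "}}") p.2) content

-- ===== PORT B =====
-- Source B's hardcoded `placeholders` table of (token, value) pairs (as char lists)
def pvPlaceholders : List (List Char × List Char) :=
  [("{{cluster_ip}}".toList, "192.168.1.100".toList),
   ("{{cluster_url}}".toList, "https://192.168.1.100".toList),
   ("{{username}}".toList, "admin".toList),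
   ("{{password}}".toList, "admin123".toList),
   ("{{fabric_name}}".toList, "TestFabric".toList),
   ("{{area_name}}".toList, "TestArea".toList),
   ("{{building_name}}".toList, "TestBuilding".toList),
   ("{{device_count}}".toList, "1".toList),
   ("{{l3vn_count}}".toList, "1".toList),
   ("{{timeout}}".toList, "30000".toList),
   ("{{file_name}}".toList, "devices.csv".toList),
   ("{{bgp_asn}}".toList, "1200".toList)]

-- Source B's while loop over index i, rendered as recursion on the remaining suffix;
-- the for/else with break = find? over the placeholder table; the fuel argument
-- (initially the string length) only makes the recursion structural: each step
-- consumes at least one character, so it never runs out.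
def pvScanGo : Nat → List Char → List Char
  | 0, _ => []
  | fuel + 1, s =>
    match pvPlaceholders.find? (fun q => q.1.isPrefixOf s) with
    | some p => p.2 ++ pvScanGo fuel (s.drop p.1.length)
    | none =>
      match s with
      | [] => []
      | c :: t => c :: pvScanGo fuel t

def apply_default_values_py_alt (content : String) : String :=
  String.ofList (pvScanGo content.toList.length content.toList)

-- ===== PRECONDITION & SPEC =====
def Spec_apply_default_values_py (content : String) (out : String) : Prop := out = apply_default_values_py_alt content
instance (content : String) (out : String) : Decidable (Spec_apply_default_values_py content out) := by unfold Spec_apply_default_values_py; infer_instance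

-- ===== CLAIM (what is proved, stated in full; the proofs are below) =====
def Claim_equal_apply_default_values_py : Prop := ∀ (content : String), Dom_apply_default_values_py content → Spec_apply_default_values_py content (apply_default_values_py content)

-- ===== LEMMAS AND PROOFS =====

set_option maxRecDepth 10000

-- A's (token, value) pairs, at char level, coincide with B's hardcoded table
theorem defaults_map_eq :
    pvDefaultValues.map (fun p => (("{{" ++ p.1 ++ "}}").toList, p.2.toList))
      = pvPlaceholders := by decide

-- all nonempty suffixes of the placeholder tokens
def pvW : List (List Char) :=
  (pvPlaceholders.map (·.1)).flatMap (fun t => t.tails.filter (fun w => !w.isEmpty))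

-- `content.replace(old, new)` for old ≠ '' as a plain left-to-right recursion
def repC (old new : List Char) (s : List Char) : List Char :=
  if _h : old ≠ [] ∧ old.isPrefixOf s then new ++ repC old new (s.drop old.length)
  else match s with
    | [] => []
    | c :: t => c :: repC old new t
termination_by s.length
decreasing_by
· rcases _h with ⟨hne, hp⟩
  have hle : old.length ≤ s.length := (List.isPrefixOf_iff_prefix.mp hp).length_le
  have : 0 < old.length := List.length_pos_of_ne_nil hne
  simp; omega
· simp

theorem repC_nil (old new : List Char) : repC old new [] = [] := by
  have : ¬ (old ≠ [] ∧ old.isPrefixOf ([] : List Char)) := by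
    rintro ⟨hne, hp⟩
    exact hne (List.prefix_nil.mp (List.isPrefixOf_iff_prefix.mp hp))
  rw [repC, dif_neg this]

theorem repC_match (old new s : List Char) (hne : old ≠ []) (hp : old <+: s) :
    repC old new s = new ++ repC old new (s.drop old.length) := by
  rw [repC, dif_pos ⟨hne, List.isPrefixOf_iff_prefix.mpr hp⟩]

theorem repC_cons (old new : List Char) (c : Char) (t : List Char)
    (h : ¬ old <+: (c :: t)) :
    repC old new (c :: t) = c :: repC old new t := by
  have : ¬ (old ≠ [] ∧ old.isPrefixOf (c :: t)) := by
    rintro ⟨-, hp⟩; exact h (List.isPrefixOf_iff_prefix.mp hp)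
  rw [repC, dif_neg this]

theorem go_eq (old new : List Char) (hne : old ≠ []) :
    ∀ fuel l acc, l.length ≤ fuel →
      PySem.Chars.replace.go old new fuel l acc = acc.reverse ++ repC old new l := by
  intro fuel
  induction fuel with
  | zero =>
    intro l acc hl
    have : l = [] := List.length_eq_zero_iff.mp (Nat.le_zero.mp hl)
    subst this
    simp [PySem.Chars.replace.go, repC_nil]
  | succ f ih =>
    intro l acc hl
    match l with
    | [] => simp [PySem.Chars.replace.go, repC_nil]
    | c :: t =>
      rw [PySem.Chars.replace.go]
      by_cases hp : old.isPrefixOf (c :: t)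
      · have hp' : old <+: (c :: t) := List.isPrefixOf_iff_prefix.mp hp
        have hlen : 0 < old.length := List.length_pos_of_ne_nil hne
        have hle : old.length ≤ (c :: t).length := hp'.length_le
        rw [if_pos hp, ih _ _ (by simp at hl ⊢; omega), repC_match old new _ hne hp']
        simp
      · have hp' : ¬ old <+: (c :: t) := fun h => hp (List.isPrefixOf_iff_prefix.mpr h)
        rw [if_neg hp, ih _ _ (by simpa using hl), repC_cons old new c t hp']
        simp

theorem replace_eq_repC (s old new : List Char) (hne : old ≠ []) :
    PySem.Chars.replace s old new = repC old new s := by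
  rw [PySem.Chars.replace]
  have : old.isEmpty = false := by simpa [List.isEmpty_iff] using hne
  simp [this, go_eq old new hne s.length s [] le_rfl]

-- ---- concrete facts about the 12 placeholders, checked by `decide` ----

theorem tok_ne_nil : ∀ p ∈ pvPlaceholders, p.1 ≠ [] := by
  have h : pvPlaceholders.all (fun p => !p.1.isEmpty) = true := by decide
  intro p hp
  have := List.all_eq_true.mp h p hp
  simpa [List.isEmpty_iff] using this

theorem w_ne_nil : ∀ w ∈ pvW, w ≠ [] := by
  have h : pvW.all (fun w => !w.isEmpty) = true := by decide
  intro w hw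
  have := List.all_eq_true.mp h w hw
  simpa [List.isEmpty_iff] using this

theorem val_not_prefix : ∀ w ∈ pvW, ∀ p ∈ pvPlaceholders, ¬ p.2 <+: w ∧ ¬ w <+: p.2 := by
  have h : (pvW.all fun w => pvPlaceholders.all fun p =>
      !(p.2.isPrefixOf w) && !(w.isPrefixOf p.2)) = true := by decide
  intro w hw p hp
  have := List.all_eq_true.mp (List.all_eq_true.mp h w hw) p hp
  simp only [Bool.and_eq_true, Bool.not_eq_true'] at this
  refine ⟨fun hc => ?_, fun hc => ?_⟩
  · have h1 := this.1; rw [List.isPrefixOf_iff_prefix.mpr hc] at h1; simp at h1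
  · have h2 := this.2; rw [List.isPrefixOf_iff_prefix.mpr hc] at h2; simp at h2

theorem tok_w_not_prefix : ∀ w ∈ pvW, ∀ p ∈ pvPlaceholders, w ≠ p.1 →
    ¬ p.1 <+: w ∧ ¬ w <+: p.1 := by
  have h : (pvW.all fun w => pvPlaceholders.all fun p =>
      (w == p.1) || (!(p.1.isPrefixOf w) && !(w.isPrefixOf p.1))) = true := by decide
  intro w hw p hp hne
  have := List.all_eq_true.mp (List.all_eq_true.mp h w hw) p hp
  simp only [Bool.or_eq_true, beq_iff_eq, Bool.and_eq_true, Bool.not_eq_true'] at this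
  have h2 := this.resolve_left hne
  refine ⟨fun hc => ?_, fun hc => ?_⟩
  · have h1 := h2.1; rw [List.isPrefixOf_iff_prefix.mpr hc] at h1; simp at h1
  · have h1 := h2.2; rw [List.isPrefixOf_iff_prefix.mpr hc] at h1; simp at h1

theorem w_tail : ∀ w ∈ pvW, w.tail = [] ∨ w.tail ∈ pvW := by
  have h : (pvW.all fun w => w.tail.isEmpty || pvW.contains w.tail) = true := by decide
  intro w hw
  have := List.all_eq_true.mp h w hw
  simpa [List.isEmpty_iff] using this

theorem w_tail_ne_tok : ∀ w ∈ pvW, ∀ p ∈ pvPlaceholders, w.tail ≠ p.1 := by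
  have h : (pvW.all fun w => pvPlaceholders.all fun p => !(w.tail == p.1)) = true := by decide
  intro w hw p hp
  have := List.all_eq_true.mp (List.all_eq_true.mp h w hw) p hp
  simpa using this

theorem tok_mem_W : ∀ p ∈ pvPlaceholders, p.1 ∈ pvW := by
  have h : (pvPlaceholders.all fun p => pvW.contains p.1) = true := by decide
  intro p hp
  have := List.all_eq_true.mp h p hp
  simpa using this

theorem val_no_brace : ∀ p ∈ pvPlaceholders, ∀ c ∈ p.2, c ≠ '{' := by
  have h : (pvPlaceholders.all fun p => p.2.all (fun c => !(c == '{'))) = true := by decide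
  intro p hp c hc
  have := List.all_eq_true.mp (List.all_eq_true.mp h p hp) c hc
  simpa using this

theorem tok_head : ∀ p ∈ pvPlaceholders, p.1.head? = some '{' := by
  have h : (pvPlaceholders.all fun p => p.1.head? == some '{') = true := by decide
  intro p hp
  have := List.all_eq_true.mp h p hp
  simpa using this

theorem tok_inj : ∀ p ∈ pvPlaceholders, ∀ q ∈ pvPlaceholders, p.1 = q.1 → p = q := by
  have h : (pvPlaceholders.all fun p => pvPlaceholders.all fun q =>
      !(p.1 == q.1) || p == q) = true := by decide
  intro p hp q hq he
  have := List.all_eq_true.mp (List.all_eq_true.mp h p hp) q hq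
  simp [he] at this
  exact this

-- ---- generic list facts ----

theorem prefix_append_cases {w u X : List Char} (h : w <+: u ++ X) : w <+: u ∨ u <+: w := by
  by_cases hle : w.length ≤ u.length
  · left
    have h1 : w = (u ++ X).take w.length := List.prefix_iff_eq_take.mp h
    rw [List.take_append_of_le_length hle] at h1
    exact h1 ▸ List.take_prefix _ _
  · right
    have hlt : u.length ≤ w.length := Nat.le_of_not_le hle
    have h1 : w = (u ++ X).take w.length := List.prefix_iff_eq_take.mp h
    have h2 : w.take u.length = u := by
      rw [h1, List.take_take, min_eq_left hlt]
      exact List.take_left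
    exact List.prefix_iff_eq_take.mpr h2.symm

-- ---- replacements never create, and walk over, placeholder-suffix prefixes ----

theorem noCreate : ∀ p ∈ pvPlaceholders, ∀ n (X : List Char), X.length ≤ n →
    ∀ w ∈ pvW, ¬ w <+: X → ¬ w <+: repC p.1 p.2 X := by
  intro p hp n
  induction n with
  | zero =>
    intro X hX w hw _
    have : X = [] := List.length_eq_zero_iff.mp (Nat.le_zero.mp hX)
    subst this
    rw [repC_nil]
    intro h
    exact w_ne_nil w hw (List.prefix_nil.mp h)
  | succ n ih =>
    intro X hX w hw hnp
    by_cases hpre : p.1 <+: X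
    · rw [repC_match _ _ _ (tok_ne_nil p hp) hpre]
      intro hcon
      rcases prefix_append_cases hcon with h1 | h2
      · exact (val_not_prefix w hw p hp).2 h1
      · exact (val_not_prefix w hw p hp).1 h2
    · match X with
      | [] =>
        rw [repC_nil]
        intro h
        exact w_ne_nil w hw (List.prefix_nil.mp h)
      | c :: t =>
        rw [repC_cons _ _ _ _ hpre]
        intro hcon
        cases w with
        | nil => exact w_ne_nil [] hw rfl
        | cons a w' =>
          rw [List.cons_prefix_cons] at hcon
          obtain ⟨rfl, hw'⟩ := hcon
          have hnt : ¬ w' <+: t := by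
            intro h
            exact hnp (List.cons_prefix_cons.mpr ⟨rfl, h⟩)
          by_cases hw0 : w' = []
          · subst hw0; exact hnt List.nil_prefix
          · have hmem : w' ∈ pvW := (w_tail (a :: w') hw).resolve_left hw0
            exact ih t (by simpa using hX) w' hmem hnt hw'

theorem foldNil (ps : List (List Char × List Char)) :
    ps.foldl (fun a q => repC q.1 q.2 a) [] = [] := by
  induction ps with
  | nil => rfl
  | cons p ps ih => simpa [repC_nil] using ih

theorem foldPass : ∀ (ps : List (List Char × List Char)), (∀ p ∈ ps, p ∈ pvPlaceholders) →
    ∀ c t, (∀ q ∈ pvPlaceholders, ¬ q.1 <+: (c :: t)) →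
    ps.foldl (fun a q => repC q.1 q.2 a) (c :: t)
      = c :: ps.foldl (fun a q => repC q.1 q.2 a) t := by
  intro ps
  induction ps with
  | nil => intro _ c t _; rfl
  | cons p ps ih =>
    intro hsub c t hno
    have hp : p ∈ pvPlaceholders := hsub p List.mem_cons_self
    have hstep : repC p.1 p.2 (c :: t) = c :: repC p.1 p.2 t :=
      repC_cons _ _ _ _ (hno p hp)
    simp only [List.foldl_cons, hstep]
    apply ih (fun q hq => hsub q (List.mem_cons_of_mem _ hq))
    intro q hq
    have := noCreate p hp (c :: t).length (c :: t) le_rfl q.1 (tok_mem_W q hq) (hno q hq)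
    rwa [hstep] at this

theorem walk : ∀ p ∈ pvPlaceholders, ∀ n (w : List Char), w.length ≤ n → w ∈ pvW → w ≠ p.1 →
    ∀ X, repC p.1 p.2 (w ++ X) = w ++ repC p.1 p.2 X := by
  intro p hp n
  induction n with
  | zero =>
    intro w hw hmem _ X
    have : w = [] := List.length_eq_zero_iff.mp (Nat.le_zero.mp hw)
    exact absurd this (w_ne_nil w hmem)
  | succ n ih =>
    intro w hlen hmem hne X
    match w with
    | [] => simp
    | a :: w' =>
      have hnp : ¬ p.1 <+: (a :: w') ++ X := by
        intro h
        rcases prefix_append_cases h with h1 | h2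
        · exact (tok_w_not_prefix _ hmem p hp hne).1 h1
        · exact (tok_w_not_prefix _ hmem p hp hne).2 h2
      rw [List.cons_append, repC_cons p.1 p.2 a (w' ++ X) (by simpa using hnp)]
      by_cases hw0 : w' = []
      · subst hw0; simp
      · have hmem' : w' ∈ pvW := (w_tail (a :: w') hmem).resolve_left hw0
        have hne' : w' ≠ p.1 := w_tail_ne_tok (a :: w') hmem p hp
        rw [ih w' (by simpa using hlen) hmem' hne' X]
        simp

theorem passVal : ∀ p ∈ pvPlaceholders, ∀ (u : List Char), (∀ c ∈ u, c ≠ '{') →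
    ∀ X, repC p.1 p.2 (u ++ X) = u ++ repC p.1 p.2 X := by
  intro p hp u
  induction u with
  | nil => intro _ X; simp
  | cons c u' ih =>
    intro hu X
    obtain ⟨t', hp1⟩ : ∃ t', p.1 = '{' :: t' := by
      cases hh : p.1 with
      | nil => have := tok_head p hp; rw [hh] at this; simp at this
      | cons x t' =>
        have := tok_head p hp; rw [hh] at this; simp at this
        exact ⟨t', by rw [this]⟩
    have hnp : ¬ p.1 <+: c :: (u' ++ X) := by
      intro h
      rw [hp1, List.cons_prefix_cons] at h
      exact hu c List.mem_cons_self h.1.symm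
    rw [List.cons_append, repC_cons p.1 p.2 c (u' ++ X) hnp,
      ih (fun d hd => hu d (List.mem_cons_of_mem _ hd)) X]
    simp

theorem matchStep : ∀ p ∈ pvPlaceholders, ∀ X,
    repC p.1 p.2 (p.1 ++ X) = p.2 ++ repC p.1 p.2 X := by
  intro p hp X
  rw [repC_match _ _ _ (tok_ne_nil p hp) (List.prefix_append _ _), List.drop_left]

theorem foldPassVal : ∀ (ps : List (List Char × List Char)), (∀ p ∈ ps, p ∈ pvPlaceholders) →
    ∀ (u : List Char), (∀ c ∈ u, c ≠ '{') → ∀ X,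
    ps.foldl (fun a q => repC q.1 q.2 a) (u ++ X)
      = u ++ ps.foldl (fun a q => repC q.1 q.2 a) X := by
  intro ps
  induction ps with
  | nil => intro _ u _ X; rfl
  | cons p ps ih =>
    intro hsub u hu X
    have hp : p ∈ pvPlaceholders := hsub p List.mem_cons_self
    simp only [List.foldl_cons, passVal p hp u hu X]
    exact ih (fun q hq => hsub q (List.mem_cons_of_mem _ hq)) u hu _

theorem foldMatch : ∀ (ps : List (List Char × List Char)), (∀ p ∈ ps, p ∈ pvPlaceholders) →
    ∀ q ∈ ps, ∀ X,
    ps.foldl (fun a r => repC r.1 r.2 a) (q.1 ++ X)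
      = q.2 ++ ps.foldl (fun a r => repC r.1 r.2 a) X := by
  intro ps
  induction ps with
  | nil => intro _ q hq; exact absurd hq (List.not_mem_nil)
  | cons p ps ih =>
    intro hsub q hq X
    have hp : p ∈ pvPlaceholders := hsub p List.mem_cons_self
    have hqP : q ∈ pvPlaceholders := hsub q hq
    by_cases hpq : p = q
    · subst hpq
      simp only [List.foldl_cons, matchStep p hp X]
      exact foldPassVal ps (fun r hr => hsub r (List.mem_cons_of_mem _ hr)) p.2
        (val_no_brace p hp) _
    · have hq' : q ∈ ps := by
        rcases List.mem_cons.mp hq with h | h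
        · exact absurd h.symm hpq
        · exact h
      have hne : q.1 ≠ p.1 := fun h => hpq (tok_inj q hqP p hp h).symm
      simp only [List.foldl_cons,
        walk p hp q.1.length q.1 le_rfl (tok_mem_W q hqP) hne X]
      exact ih (fun r hr => hsub r (List.mem_cons_of_mem _ hr)) q hq' _

-- the 12-pass fold equals the single pass
theorem mainChars : ∀ fuel (s : List Char), s.length ≤ fuel →
    pvPlaceholders.foldl (fun a q => repC q.1 q.2 a) s = pvScanGo fuel s := by
  intro fuel
  induction fuel with
  | zero =>
    intro s hs
    have : s = [] := List.length_eq_zero_iff.mp (Nat.le_zero.mp hs)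
    subst this
    rw [foldNil]
    rfl
  | succ fuel ih =>
    intro s hs
    cases hf : pvPlaceholders.find? (fun q => q.1.isPrefixOf s) with
    | some p =>
      have hmem : p ∈ pvPlaceholders := List.mem_of_find?_eq_some hf
      have hpre : p.1 <+: s := List.isPrefixOf_iff_prefix.mp (by simpa using List.find?_some hf)
      obtain ⟨rest, hrest⟩ := hpre
      have hdrop : s.drop p.1.length = rest := by rw [← hrest, List.drop_left]
      have hlen1 : 0 < p.1.length := List.length_pos_of_ne_nil (tok_ne_nil p hmem)
      have hlenr : rest.length ≤ fuel := by
        have := congrArg List.length hrest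
        simp at this
        omega
      rw [pvScanGo.eq_def]
      simp only [hf]
      rw [hdrop, ← hrest, foldMatch pvPlaceholders (fun r hr => hr) p hmem rest,
        ih rest hlenr]
    | none =>
      have hno : ∀ q ∈ pvPlaceholders, ¬ q.1 <+: s := by
        intro q hq h
        have := List.find?_eq_none.mp hf q hq
        simp [List.isPrefixOf_iff_prefix.mpr h] at this
      rw [pvScanGo.eq_def]
      simp only [hf]
      match s with
      | [] => exact foldNil _
      | c :: t =>
        rw [foldPass pvPlaceholders (fun r hr => hr) c t hno, ih t (by simpa using hs)]

-- bridge A's String-level fold to the char-level fold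
theorem foldS_toList : ∀ (ps : List (String × String)) (content : String),
    (ps.foldl (fun acc p => PySem.Str.replace acc ("{{" ++ p.1 ++ "}}") p.2) content).toList
      = (ps.map (fun p => (("{{" ++ p.1 ++ "}}").toList, p.2.toList))).foldl
          (fun a q => repC q.1 q.2 a) content.toList := by
  intro ps
  induction ps with
  | nil => intro content; rfl
  | cons p ps ih =>
    intro content
    have hne : ("{{" ++ p.1 ++ "}}").toList ≠ [] := by
      rw [String.toList_append]
      exact List.append_ne_nil_of_right_ne_nil _ (by decide)
    simp only [List.foldl_cons, List.map_cons, ih, PySem.Str.toList_replace,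
      replace_eq_repC _ _ _ hne]

-- ===== VERDICT (by name: the statement is the Claim_ definition above) =====
theorem apply_default_values_py_spec : Claim_equal_apply_default_values_py := by
  intro content _
  unfold Spec_apply_default_values_py
  have hA : (apply_default_values_py content).toList
      = pvPlaceholders.foldl (fun a q => repC q.1 q.2 a) content.toList := by
    rw [← defaults_map_eq]
    exact foldS_toList pvDefaultValues content
  have hB : (apply_default_values_py_alt content).toList
      = pvScanGo content.toList.length content.toList := by
    unfold apply_default_values_py_alt
    exact String.toList_ofList
  have h := mainChars content.toList.length content.toList le_rfl
  have : (apply_default_values_py content).toList = (apply_default_values_py_alt content).toList := by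
    rw [hA, hB, h]
  calc apply_default_values_py content
      = String.ofList (apply_default_values_py content).toList := String.ofList_toList.symm
    _ = String.ofList (apply_default_values_py_alt content).toList := by rw [this]
    _ = apply_default_values_py_alt content := String.ofList_toList
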